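-- pv_equiv track=rewrite | github.com/zhangsan5213/MSRecoginitionTNTransformer | data_gen.py | split_smiles_to_vocab
-- ===== SOURCE A (Python) =====
-- def split_smiles_to_vocab(smiles, vocabs):
--     if not smiles:
--         return [[]]
--
--     valid_splits = []
--     for i in range(len(smiles)):
--         prefix = smiles[:i+1]
--         if prefix in vocabs:
--             remaining_string = smiles[i+1:]
--             sub_splits = split_smiles_to_vocab(remaining_string, vocabs)
--             for sub_split in sub_splits:
--                 valid_splits.append([prefix] + sub_split)
--
--     return valid_splits
-- ===== SOURCE B (Python) =====
-- def split_smiles_to_vocab(smiles, vocabs):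
--     vocab_set = set(vocabs)
--     n = len(smiles)
--     memo = {n: [[]]}
--
--     def go(j):
--         if j in memo:
--             return memo[j]
--         res = []
--         for i in range(j, n):
--             prefix = smiles[j:i + 1]
--             if prefix in vocab_set:
--                 for sub in go(i + 1):
--                     res.append([prefix] + sub)
--         memo[j] = res
--         return res
--
--     return go(0)
-- ===== Notes on version B (the rewrite author's own statement) =====
-- stated objective: alternative
-- what changed: Replaces the naive recursion by a top-down DP that memoizes the split list per suffix start index in a dict, so each reachable suffix is split once instead of being recomputed on every path that reaches it.
import Mathlib
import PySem

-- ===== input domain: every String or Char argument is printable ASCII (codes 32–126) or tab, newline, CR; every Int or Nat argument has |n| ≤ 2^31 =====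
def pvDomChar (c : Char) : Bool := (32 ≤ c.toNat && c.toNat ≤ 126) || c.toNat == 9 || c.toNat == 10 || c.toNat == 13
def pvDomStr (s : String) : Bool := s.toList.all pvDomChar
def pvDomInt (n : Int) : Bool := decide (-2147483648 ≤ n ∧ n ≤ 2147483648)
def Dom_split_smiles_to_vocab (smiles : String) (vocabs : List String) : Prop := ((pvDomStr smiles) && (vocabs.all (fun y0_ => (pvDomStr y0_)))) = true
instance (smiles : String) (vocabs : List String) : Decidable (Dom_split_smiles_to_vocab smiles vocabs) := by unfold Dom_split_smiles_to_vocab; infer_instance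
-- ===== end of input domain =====

-- B memoizes the split results per suffix start index (top-down DP over a dict), so each
-- reachable suffix is split once, instead of A's naive recursion which revisits suffixes.

-- ===== PORT A =====
-- A's recursion, on the character list of the string: for each prefix in the vocab,
-- recurse on the remaining suffix and prepend the prefix to each sub-split.
def split_smiles_to_vocab_core (cs : List Char) (vocabs : List String) : List (List String) :=
  if h : cs = [] then [[]]
  else
    (List.range cs.length).foldl (fun acc i =>
      let pre := String.ofList (cs.take (i + 1))
      if pre ∈ vocabs then
        acc ++ (split_smiles_to_vocab_core (cs.drop (i + 1)) vocabs).map (fun s => pre :: s)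
      else acc) []
termination_by cs.length
decreasing_by
  have : 0 < cs.length := List.length_pos_of_ne_nil h
  simp [List.length_drop]; omega

def split_smiles_to_vocab (smiles : String) (vocabs : List String) : List (List String) :=
  split_smiles_to_vocab_core smiles.toList vocabs

-- ===== PORT B =====
-- B's memoized recursion: `goB j memo` is Python's `go(j)`, threading the memo dict;
-- `loopB` is go's inner `for i in range(j, n)` loop with `res` as accumulator.
mutual
def goB (cs : List Char) (vset : List String) (n j : Nat)
    (memo : PySem.Dict Nat (List (List String))) :
    PySem.Dict Nat (List (List String)) × List (List String) :=
  match memo.get? j with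
  | some v => (memo, v)
  | none =>
      let r := loopB cs vset n j j memo []
      (r.1.insert j r.2, r.2)
termination_by (n - j, 1)

def loopB (cs : List Char) (vset : List String) (n j i : Nat)
    (memo : PySem.Dict Nat (List (List String))) (acc : List (List String)) :
    PySem.Dict Nat (List (List String)) × List (List String) :=
  if h : i < n then
    let pre := String.ofList ((cs.drop j).take (i + 1 - j))
    if pre ∈ vset then
      let r := goB cs vset n (i + 1) memo
      loopB cs vset n j (i + 1) r.1 (acc ++ r.2.map (fun s => pre :: s))
    else
      loopB cs vset n j (i + 1) memo acc
  else (memo, acc)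
termination_by (n - i, 0)
end

def split_smiles_to_vocab_alt (smiles : String) (vocabs : List String) : List (List String) :=
  let cs := smiles.toList
  let n := cs.length
  let vset := PySem.Set.ofList vocabs
  (goB cs vset n 0 (PySem.Dict.empty.insert n [[]])).2

-- ===== PRECONDITION & SPEC =====
def Spec_split_smiles_to_vocab (smiles : String) (vocabs : List String) (out : List (List String)) : Prop := out = split_smiles_to_vocab_alt smiles vocabs
instance (smiles : String) (vocabs : List String) (out : List (List String)) : Decidable (Spec_split_smiles_to_vocab smiles vocabs out) := by unfold Spec_split_smiles_to_vocab; infer_instance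

-- ===== CLAIM (what is proved, stated in full; the proofs are below) =====
def Claim_equal_split_smiles_to_vocab : Prop := ∀ (smiles : String) (vocabs : List String), Dom_split_smiles_to_vocab smiles vocabs → Spec_split_smiles_to_vocab smiles vocabs (split_smiles_to_vocab smiles vocabs)

-- ===== LEMMAS AND PROOFS =====

-- What loopB appends: the A-result contributions for indices i, i+1, …, n-1 of suffix j.
def splitsFrom (cs : List Char) (vocabs : List String) (n j i : Nat) : List (List String) :=
  if i < n then
    (if String.ofList ((cs.drop j).take (i + 1 - j)) ∈ vocabs then
        (split_smiles_to_vocab_core (cs.drop (i + 1)) vocabs).map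
          (fun s => String.ofList ((cs.drop j).take (i + 1 - j)) :: s)
      else [])
      ++ splitsFrom cs vocabs n j (i + 1)
  else []
termination_by n - i

-- The memo invariant: every stored entry is A's result for that suffix, and the
-- base entry for index n is present.
def MemoInv (cs : List Char) (vocabs : List String)
    (memo : PySem.Dict Nat (List (List String))) : Prop :=
  memo.get? cs.length = some [[]] ∧
  ∀ k v, memo.get? k = some v → v = split_smiles_to_vocab_core (cs.drop k) vocabs

theorem splitsFrom_eq_flatMap (cs : List Char) (vocabs : List String) (n j : Nat) :
    ∀ i, splitsFrom cs vocabs n j i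
      = (List.range' i (n - i)).flatMap (fun t =>
          if String.ofList ((cs.drop j).take (t + 1 - j)) ∈ vocabs then
            (split_smiles_to_vocab_core (cs.drop (t + 1)) vocabs).map
              (fun s => String.ofList ((cs.drop j).take (t + 1 - j)) :: s)
          else []) := by
  intro i
  induction hk : n - i generalizing i with
  | zero =>
    rw [splitsFrom]
    simp [Nat.not_lt.mpr (Nat.le_of_sub_eq_zero hk)]
  | succ k ih =>
    have hi : i < n := by omega
    rw [splitsFrom, if_pos hi, List.range'_succ, List.flatMap_cons, ih (i + 1) (by omega)]

theorem flatMap_congr_mem {α β : Type} {l : List α} {f g : α → List β}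
    (h : ∀ x ∈ l, f x = g x) : l.flatMap f = l.flatMap g := by
  induction l with
  | nil => rfl
  | cons a t ih =>
    simp only [List.flatMap_cons]
    rw [h a (by simp), ih (fun x hx => h x (by simp [hx]))]

theorem core_eq_splitsFrom (cs : List Char) (vocabs : List String) (j : Nat)
    (hj : j < cs.length) :
    split_smiles_to_vocab_core (cs.drop j) vocabs = splitsFrom cs vocabs cs.length j j := by
  have hne : cs.drop j ≠ [] := by
    intro h
    have := congrArg List.length h
    simp at this; omega
  rw [split_smiles_to_vocab_core.eq_def, dif_neg hne]
  refine Eq.trans (PySem.List.foldl_congr_mem _ _ (fun acc i => acc ++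
      (if String.ofList ((cs.drop j).take (i + 1)) ∈ vocabs then
        (split_smiles_to_vocab_core ((cs.drop j).drop (i + 1)) vocabs).map
          (fun s => String.ofList ((cs.drop j).take (i + 1)) :: s)
      else [])) _ ?_) ?_
  · intro acc x _
    dsimp only
    split <;> simp
  · rw [PySem.List.foldl_append_eq_flatMap, List.nil_append, splitsFrom_eq_flatMap]
    have hlen : (cs.drop j).length = cs.length - j := by simp
    rw [hlen, List.range'_eq_map_range, List.flatMap_map]
    refine (flatMap_congr_mem ?_).symm
    intro x _
    have e1 : j + x + 1 - j = x + 1 := by omega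
    have e2 : cs.drop (j + x + 1) = (cs.drop j).drop (x + 1) := by
      rw [List.drop_drop]; ring_nf
    simp only [e1, e2]

theorem goB_loopB_spec (cs : List Char) (vocabs : List String) :
    ∀ m : Nat,
      (∀ (j i : Nat) (memo : PySem.Dict Nat (List (List String))) (acc : List (List String)),
        j ≤ i → cs.length - i ≤ m → MemoInv cs vocabs memo →
        (loopB cs (PySem.Set.ofList vocabs) cs.length j i memo acc).2
            = acc ++ splitsFrom cs vocabs cs.length j i ∧
          MemoInv cs vocabs (loopB cs (PySem.Set.ofList vocabs) cs.length j i memo acc).1) ∧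
      (∀ (j : Nat) (memo : PySem.Dict Nat (List (List String))),
        j ≤ cs.length → cs.length - j ≤ m → MemoInv cs vocabs memo →
        (goB cs (PySem.Set.ofList vocabs) cs.length j memo).2
            = split_smiles_to_vocab_core (cs.drop j) vocabs ∧
          MemoInv cs vocabs (goB cs (PySem.Set.ofList vocabs) cs.length j memo).1) := by
  intro m
  induction m with
  | zero =>
    constructor
    · intro j i memo acc _ him hinv
      have hi : ¬ i < cs.length := by omega
      rw [loopB.eq_def, dif_neg hi, splitsFrom, if_neg hi]
      exact ⟨by simp, hinv⟩
    · intro j memo hjn hjm hinv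
      have hj : j = cs.length := by omega
      subst hj
      rw [goB.eq_def, hinv.1]
      refine ⟨?_, hinv⟩
      rw [List.drop_length, split_smiles_to_vocab_core.eq_def]
      simp
  | succ m ih =>
    obtain ⟨ihL, ihG⟩ := ih
    have hL : ∀ (j i : Nat) (memo : PySem.Dict Nat (List (List String))) (acc : List (List String)),
        j ≤ i → cs.length - i ≤ m + 1 → MemoInv cs vocabs memo →
        (loopB cs (PySem.Set.ofList vocabs) cs.length j i memo acc).2
            = acc ++ splitsFrom cs vocabs cs.length j i ∧
          MemoInv cs vocabs (loopB cs (PySem.Set.ofList vocabs) cs.length j i memo acc).1 := by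
      intro j i memo acc hji him hinv
      by_cases hi : i < cs.length
      · rw [loopB.eq_def, dif_pos hi]
        dsimp only
        rw [splitsFrom, if_pos hi]
        by_cases hp : String.ofList ((cs.drop j).take (i + 1 - j)) ∈ vocabs
        · rw [if_pos ((PySem.Set.mem_ofList _ _).mpr hp), if_pos hp]
          have hg := ihG (i + 1) memo (by omega) (by omega) hinv
          have hl := ihL j (i + 1)
            (goB cs (PySem.Set.ofList vocabs) cs.length (i + 1) memo).1
            (acc ++ ((goB cs (PySem.Set.ofList vocabs) cs.length (i + 1) memo).2).map
              (fun s => String.ofList ((cs.drop j).take (i + 1 - j)) :: s))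
            (by omega) (by omega) hg.2
          refine ⟨?_, hl.2⟩
          rw [hl.1, hg.1, List.append_assoc]
        · rw [if_neg (fun hc => hp ((PySem.Set.mem_ofList _ _).mp hc)), if_neg hp]
          have hl := ihL j (i + 1) memo acc (by omega) (by omega) hinv
          refine ⟨?_, hl.2⟩
          rw [hl.1, List.nil_append]
      · rw [loopB.eq_def, dif_neg hi, splitsFrom, if_neg hi]
        exact ⟨by simp, hinv⟩
    refine ⟨hL, ?_⟩
    intro j memo hjn hjm hinv
    rw [goB.eq_def]
    cases hmj : memo.get? j with
    | some v =>
      exact ⟨hinv.2 j v hmj, hinv⟩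
    | none =>
      dsimp only
      have hjne : j ≠ cs.length := by
        intro h; rw [h, hinv.1] at hmj; cases hmj
      have hjlt : j < cs.length := lt_of_le_of_ne hjn hjne
      have hl := hL j j memo [] le_rfl (by omega) hinv
      constructor
      · rw [hl.1, List.nil_append, ← core_eq_splitsFrom cs vocabs j hjlt]
      · obtain ⟨h1, h2⟩ := hl.2
        refine ⟨?_, ?_⟩
        · rw [PySem.Dict.get?_insert_of_ne _ _ (Ne.symm hjne)]
          exact h1
        · intro k v hk
          by_cases hkj : k = j
          · subst hkj
            rw [PySem.Dict.get?_insert_self] at hk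
            cases hk
            rw [hl.1, List.nil_append, ← core_eq_splitsFrom cs vocabs k hjlt]
          · rw [PySem.Dict.get?_insert_of_ne _ _ hkj] at hk
            exact h2 k v hk

-- ===== VERDICT (by name: the statement is the Claim_ definition above) =====
theorem split_smiles_to_vocab_spec : Claim_equal_split_smiles_to_vocab := by
  intro smiles vocabs _
  unfold Spec_split_smiles_to_vocab split_smiles_to_vocab split_smiles_to_vocab_alt
  set cs := smiles.toList with hcs
  have hinv : MemoInv cs vocabs (PySem.Dict.empty.insert cs.length [[]]) := by
    constructor
    · exact PySem.Dict.get?_insert_self _ _ _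
    · intro k v hk
      by_cases h : k = cs.length
      · subst h
        rw [PySem.Dict.get?_insert_self] at hk
        cases hk
        rw [split_smiles_to_vocab_core.eq_def]
        simp
      · rw [PySem.Dict.get?_insert_of_ne _ _ h, PySem.Dict.get?_empty] at hk
        cases hk
  have h1 := (((goB_loopB_spec cs vocabs) cs.length).2 0 _ (Nat.zero_le _) (by omega) hinv).1
  rw [List.drop_zero] at h1
  exact h1.symm
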